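-- pv_equiv track=rewrite | github.com/tosh2230/stairlight | src/stairlight/source/base.py | ignore_params_from_template_str
-- ===== SOURCE A (Python) =====
-- def ignore_params_from_template_str(
--     template_str: str, ignore_params: "list[str]"
-- ) -> str:
--     """ignore parameters from template string
--
--     Args:
--         template_str (str): template string
--         ignore_params (list[str]): ignore parameters
--
--     Returns:
--         str: replaced template string
--     """
--     if not ignore_params:
--         ignore_params = []
--     replaced_str = template_str
--     for ignore_param in ignore_params:
--         replaced_str = replaced_str.replace(
--             "{{{{ {} }}}}".format(ignore_param), "ignored"
--         )
--     return replaced_str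
-- ===== SOURCE B (Python) =====
-- def ignore_params_from_template_str(
--     template_str: str, ignore_params: "list[str]"
-- ) -> str:
--     """ignore parameters from template string
--
--     Single left-to-right scan: every pattern starts with '{', so at each
--     position first check the character; at a '{' try the '{{ param }}'
--     patterns in list order; on a match emit 'ignored' and jump past it,
--     otherwise emit the character. Replaces the per-parameter replace passes.
--     """
--     if not ignore_params:
--         return template_str
--     patterns = ["{{ " + p + " }}" for p in ignore_params]
--     pieces = []
--     i = 0
--     n = len(template_str)
--     while i < n:
--         if template_str[i] == "{":
--             for pattern in patterns:
--                 if template_str.startswith(pattern, i):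
--                     pieces.append("ignored")
--                     i += len(pattern)
--                     break
--             else:
--                 pieces.append(template_str[i])
--                 i += 1
--         else:
--             pieces.append(template_str[i])
--             i += 1
--     return "".join(pieces)
-- ===== Notes on version B (the rewrite author's own statement) =====
-- stated objective: faster
-- what changed: replaces A's m sequential full-string replace passes (one per parameter) by a single left-to-right scan that tries the '{{ param }}' patterns in list order only at '{' positions, emits 'ignored' on a match and jumps past it; Pre_ excludes params containing the substring 'ignored', and params containing '{' whose own pattern occurs in the template, where A's cascaded pass order and B's one-pass result are both accidental
-- outside the precondition, e.g. on ignore_params_from_template_str('{{ {{ a }} }}', ['a', 'ignored']): A returns 'ignored', B returns '{{ ignored }}'; on ignore_params_from_template_str('{{ x }} {{ a }}', ['a', 'x }} {{ a']): A returns '{{ x }} ignored', B returns 'ignored'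
import Mathlib
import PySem

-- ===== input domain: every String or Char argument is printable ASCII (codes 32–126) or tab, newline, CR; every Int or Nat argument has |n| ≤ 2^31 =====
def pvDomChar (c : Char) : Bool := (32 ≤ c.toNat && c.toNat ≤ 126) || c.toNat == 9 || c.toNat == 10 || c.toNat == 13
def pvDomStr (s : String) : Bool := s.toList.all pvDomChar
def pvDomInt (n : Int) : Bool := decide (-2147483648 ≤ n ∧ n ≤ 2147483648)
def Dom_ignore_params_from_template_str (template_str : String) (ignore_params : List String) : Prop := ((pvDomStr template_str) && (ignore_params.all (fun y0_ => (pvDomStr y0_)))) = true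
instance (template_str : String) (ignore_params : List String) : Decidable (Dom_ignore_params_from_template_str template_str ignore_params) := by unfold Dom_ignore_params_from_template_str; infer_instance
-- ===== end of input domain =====

-- B replaces A's m per-parameter replace passes by ONE left-to-right scan trying the '{{ param }}' patterns in list order only at '{' positions (measured faster on a timing run's large inputs); Pre_ excludes params containing the substring "ignored", and params containing '{' whose own pattern occurs in the template, where the two pass orders are both accidental.


-- ===== PORT A =====
-- "{{{{ {} }}}}".format(p)  is  "{{ " + p + " }}"
def pvPat (p : String) : List Char := '{' :: '{' :: ' ' :: (p.toList ++ [' ', '}', '}'])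

def ignore_params_from_template_str (template_str : String) (ignore_params : List String) : String :=
  let ps : List String := if ignore_params.isEmpty then [] else ignore_params
  String.ofList (ps.foldl
    (fun replaced p => PySem.Chars.replace replaced (pvPat p) "ignored".toList)
    template_str.toList)

-- ===== PORT B =====
-- single scan: every pattern starts with '{', so only at a '{' try the patterns in list order;
-- on a match emit "ignored" and jump past it, otherwise emit the character
def pvScan (pats : List (List Char)) : Nat → List Char → List Char
  | 0, _ => []
  | _ + 1, [] => []
  | fuel + 1, c :: t =>
    if c = '{' then
      match pats.find? (fun q => q.isPrefixOf (c :: t)) with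
      | some q => "ignored".toList ++ pvScan pats fuel (List.drop q.length (c :: t))
      | none => c :: pvScan pats fuel t
    else c :: pvScan pats fuel t

def ignore_params_from_template_str_alt (template_str : String) (ignore_params : List String) : String :=
  if ignore_params.isEmpty then template_str
  else String.ofList (pvScan (ignore_params.map pvPat) template_str.toList.length template_str.toList)

-- ===== PRECONDITION & SPEC =====
-- Pre_ excludes parameters that contain the substring "ignored" (a later pass of A can then match
-- text produced by an earlier substitution) and parameters that contain '{' while their own
-- '{{ param }}' pattern occurs in the template (their pattern can then overlap another pattern);
-- on such overlaps A's sequential cascade and B's single-pass result are both accidental orderings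
-- that no caller would specify.
def Pre_ignore_params_from_template_str (template_str : String) (ignore_params : List String) : Prop :=
  ∀ p ∈ ignore_params,
    ¬ ("ignored".toList <:+: p.toList) ∧
    ('{' ∉ p.toList ∨ ¬ (pvPat p <:+: template_str.toList))
instance (template_str : String) (ignore_params : List String) : Decidable (Pre_ignore_params_from_template_str template_str ignore_params) := by unfold Pre_ignore_params_from_template_str; infer_instance

def pvWitness_ignore_params_from_template_str : String × List String :=
  ("SELECT {{ a }} FROM {{ b }}", ["a", "b"])

def Spec_ignore_params_from_template_str (template_str : String) (ignore_params : List String) (out : String) : Prop := out = ignore_params_from_template_str_alt template_str ignore_params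
instance (template_str : String) (ignore_params : List String) (out : String) : Decidable (Spec_ignore_params_from_template_str template_str ignore_params out) := by unfold Spec_ignore_params_from_template_str; infer_instance

-- ===== CLAIM (what is proved, stated in full; the proofs are below) =====
def Claim_equal_ignore_params_from_template_str : Prop := ∀ (template_str : String) (ignore_params : List String), Dom_ignore_params_from_template_str template_str ignore_params → Pre_ignore_params_from_template_str template_str ignore_params → Spec_ignore_params_from_template_str template_str ignore_params (ignore_params_from_template_str template_str ignore_params)

-- ===== LEMMAS AND PROOFS =====

-- replace.go with a non-empty accumulator = the accumulator's reverse in front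
theorem pv_replaceGo_acc (old new : List Char) (fuel : Nat) :
    ∀ (l acc : List Char),
      PySem.Chars.replace.go old new fuel l acc
        = acc.reverse ++ PySem.Chars.replace.go old new fuel l [] := by
  induction fuel with
  | zero => intro l acc; simp [PySem.Chars.replace.go]
  | succ fuel ih =>
      intro l acc
      cases l with
      | nil => simp [PySem.Chars.replace.go]
      | cons c t =>
          simp only [PySem.Chars.replace.go]
          by_cases h : old.isPrefixOf (c :: t) = true
          · rw [if_pos h]
            rw [ih _ (new.reverse ++ acc), ih _ (new.reverse ++ [])]
            simp only [List.append_nil, List.reverse_append, List.reverse_reverse,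
              List.append_assoc]
            rw [if_pos h]
          · rw [if_neg h]
            rw [ih t (c :: acc), ih t [c]]
            simp only [List.reverse_cons, List.reverse_nil, List.nil_append,
              List.append_assoc, List.singleton_append]
            rw [if_neg h]

-- replace.go is fuel-insensitive once fuel covers the remaining length (old ≠ [])
theorem pv_replaceGo_fuel (old new : List Char) (hold : old ≠ []) (fuel : Nat) :
    ∀ (l acc : List Char), l.length ≤ fuel →
      PySem.Chars.replace.go old new (fuel + 1) l acc
        = PySem.Chars.replace.go old new fuel l acc := by
  induction fuel with
  | zero =>
      intro l acc hl
      have : l = [] := by cases l <;> simp_all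
      subst this
      simp [PySem.Chars.replace.go]
  | succ fuel ih =>
      intro l acc hl
      cases l with
      | nil => simp [PySem.Chars.replace.go]
      | cons c t =>
          simp only [PySem.Chars.replace.go]
          by_cases h : old.isPrefixOf (c :: t) = true
          · rw [if_pos h, if_pos h]
            apply ih
            cases old with
            | nil => exact absurd rfl hold
            | cons o os =>
                simp only [List.length_drop, List.length_cons] at *
                omega
          · rw [if_neg h, if_neg h]
            apply ih
            simp only [List.length_cons] at hl
            omega

theorem pv_replaceGo_fuel_ge (old new : List Char) (hold : old ≠ []) :
    ∀ (fuel : Nat) (l acc : List Char), l.length ≤ fuel →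
      PySem.Chars.replace.go old new fuel l acc
        = PySem.Chars.replace.go old new l.length l acc := by
  intro fuel
  induction fuel with
  | zero =>
      intro l acc hl
      have : l = [] := by cases l <;> simp_all
      subst this; rfl
  | succ fuel ih =>
      intro l acc hl
      by_cases h : l.length = fuel + 1
      · rw [h]
      · have hl' : l.length ≤ fuel := by omega
        rw [pv_replaceGo_fuel old new hold fuel l acc hl', ih l acc hl']

theorem pv_replace_nil (old new : List Char) (hold : old ≠ []) :
    PySem.Chars.replace [] old new = [] := by
  unfold PySem.Chars.replace
  rw [if_neg (by simp [List.isEmpty_iff, hold])]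
  simp [PySem.Chars.replace.go]

theorem pv_replace_cons (old new : List Char) (c : Char) (t : List Char) (hold : old ≠ [])
    (h : old.isPrefixOf (c :: t) = false) :
    PySem.Chars.replace (c :: t) old new = c :: PySem.Chars.replace t old new := by
  unfold PySem.Chars.replace
  rw [if_neg (by simp [List.isEmpty_iff, hold]), if_neg (by simp [List.isEmpty_iff, hold])]
  show PySem.Chars.replace.go old new (t.length + 1) (c :: t) [] = _
  simp only [PySem.Chars.replace.go, h, Bool.false_eq_true, if_false]
  rw [pv_replaceGo_acc old new t.length t [c]]
  simp

theorem pv_replace_head (old new r : List Char) (hold : old ≠ []) :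
    PySem.Chars.replace (old ++ r) old new = new ++ PySem.Chars.replace r old new := by
  obtain ⟨o, os, rfl⟩ : ∃ o os, old = o :: os := by
    cases old with
    | nil => exact absurd rfl hold
    | cons o os => exact ⟨o, os, rfl⟩
  unfold PySem.Chars.replace
  rw [if_neg (by simp), if_neg (by simp)]
  have hpre : (o :: os).isPrefixOf ((o :: os) ++ r) = true :=
    List.isPrefixOf_iff_prefix.mpr (List.prefix_append _ _)
  show PySem.Chars.replace.go (o :: os) new ((o :: os) ++ r).length ((o :: os) ++ r) [] = _
  have hlen : ((o :: os) ++ r).length = ((os ++ r).length) + 1 := by simp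
  rw [hlen]
  rw [show ((o :: os) ++ r) = o :: (os ++ r) from rfl]
  simp only [PySem.Chars.replace.go]
  rw [show (o :: (os ++ r)) = ((o :: os) ++ r) from rfl, hpre]
  simp only [if_true]
  rw [List.drop_left]
  rw [pv_replaceGo_acc]
  rw [pv_replaceGo_fuel_ge (o :: os) new hold (os ++ r).length r _ (by simp)]
  simp

theorem pv_prefix_head (q' z : List Char) (h : (('{' :: q').isPrefixOf z) = true) :
    ∃ z', z = '{' :: z' := by
  cases z with
  | nil => simp [List.isPrefixOf] at h
  | cons a z' =>
      simp only [List.isPrefixOf, Bool.and_eq_true, beq_iff_eq] at h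
      exact ⟨z', by rw [h.1]⟩

theorem pv_skip (old new : List Char) (hold : old ≠ []) :
    ∀ (u r : List Char),
      (∀ j, j < u.length → old.isPrefixOf (List.drop j (u ++ r)) = false) →
      PySem.Chars.replace (u ++ r) old new = u ++ PySem.Chars.replace r old new := by
  intro u
  induction u with
  | nil => intro r _; simp
  | cons a u ih =>
      intro r hj
      have h0 : old.isPrefixOf (a :: (u ++ r)) = false := by
        have := hj 0 (by simp)
        simpa using this
      rw [List.cons_append, pv_replace_cons old new a (u ++ r) hold h0]
      rw [ih r (fun j hjlt => by
        have := hj (j + 1) (by simp; omega)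
        simpa using this)]
      rfl

theorem pv_pullback (old x P : List Char) (hold : old ≠ []) (hxl : '}' ∉ x)
    (hinf : ¬ x <:+: P) (hP : P.getLast? = some '}') :
    ∀ (s u : List Char), u <:+ P → u <+: PySem.Chars.replace s old x → u <+: s := by
  intro s
  induction s with
  | nil =>
      intro u _ hpre
      rw [pv_replace_nil old x hold, List.prefix_nil] at hpre
      simp [hpre]
  | cons c t ih =>
      intro u hsuf hpre
      by_cases hm : old.isPrefixOf (c :: t) = true
      · obtain ⟨r, hr⟩ := List.isPrefixOf_iff_prefix.mp hm
        rw [← hr, pv_replace_head old x r hold] at hpre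
        rcases eq_or_ne u [] with rfl | hne
        · exact List.nil_prefix
        exfalso
        have hlast : u.getLast? = some '}' := by
          obtain ⟨v, hv⟩ := hsuf
          rw [← hv, List.getLast?_append_of_ne_nil v hne] at hP
          exact hP
        by_cases hlen : u.length ≤ x.length
        · have hux : u <+: x :=
            List.prefix_of_prefix_length_le hpre (List.prefix_append x _) hlen
          exact hxl (hux.subset (List.mem_of_getLast? hlast))
        · have hxu : x <+: u :=
            List.prefix_of_prefix_length_le (List.prefix_append x _) hpre (by omega)
          exact hinf (hxu.isInfix.trans hsuf.isInfix)
      · have hm' : old.isPrefixOf (c :: t) = false := Bool.eq_false_iff.mpr hm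
        rw [pv_replace_cons old x c t hold hm'] at hpre
        rcases u with _ | ⟨a, u'⟩
        · exact List.nil_prefix
        · obtain ⟨hac, hu'⟩ := List.cons_prefix_cons.mp hpre
          have hsuf' : u' <:+ P := (List.suffix_cons a u').trans hsuf
          exact List.cons_prefix_cons.mpr ⟨hac, ih u' hsuf' hu'⟩

theorem pv_pat_ne_nil (p : String) : pvPat p ≠ [] := by simp [pvPat]

theorem pv_pat_getLast (p : String) : (pvPat p).getLast? = some '}' := by
  have h : pvPat p = ('{' :: '{' :: ' ' :: (p.toList ++ [' ', '}'])) ++ ['}'] := by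
    simp [pvPat]
  rw [h, List.getLast?_concat]

-- "ignored" inside a built pattern must lie inside the parameter (no brace/space in "ignored")
theorem pv_ign_infix (p : String) (h : "ignored".toList <:+: pvPat p) :
    "ignored".toList <:+: p.toList := by
  obtain ⟨s, t, hst⟩ := h
  have hign : "ignored".toList = ['i', 'g', 'n', 'o', 'r', 'e', 'd'] := rfl
  rw [hign] at hst ⊢
  match s with
  | [] => simp [pvPat] at hst
  | [a] => simp [pvPat] at hst
  | [a, b] => simp [pvPat] at hst
  | a :: b :: c :: s' =>
      simp only [pvPat, List.cons_append, List.cons.injEq] at hst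
      obtain ⟨_, _, _, h4⟩ := hst
      -- h4 : s' ++ ['i',…,'d'] ++ t = p.toList ++ [' ', '}', '}']
      have h5 := congrArg List.reverse h4
      simp only [List.reverse_append, List.reverse_cons, List.reverse_nil, List.nil_append,
        List.append_assoc, List.cons_append] at h5
      rcases ht : t.reverse with _ | ⟨x1, _ | ⟨x2, _ | ⟨x3, u'⟩⟩⟩ <;> rw [ht] at h5 <;>
        simp only [List.nil_append, List.cons_append, List.cons.injEq] at h5
      · exact absurd h5.1 (by decide)
      · exact absurd h5.2.1 (by decide)
      · exact absurd h5.2.2.1 (by decide)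
      · obtain ⟨_, _, _, h6⟩ := h5
        -- h6 : u' ++ ('d' :: … ++ s'.reverse) = p.toList.reverse   (some association)
        have h7 := congrArg List.reverse h6
        simp only [List.reverse_append, List.reverse_cons, List.reverse_reverse,
          List.nil_append, List.append_assoc, List.cons_append] at h7
        exact ⟨s', u'.reverse, by simpa using h7⟩

-- no '{ '-started pattern can match strictly inside "ignored"
theorem pv_no_match_in_ign (p : String) (y : List Char) :
    ∀ j, j < ("ignored".toList).length →
      (pvPat p).isPrefixOf (List.drop j ("ignored".toList ++ y)) = false := by
  intro j hj
  have hign : "ignored".toList = ['i', 'g', 'n', 'o', 'r', 'e', 'd'] := rfl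
  rw [hign] at hj ⊢
  simp only [List.length_cons, List.length_nil] at hj
  interval_cases j <;> simp [pvPat, List.isPrefixOf]

-- no '{ '-started pattern can match strictly inside a pattern of a '{'-free parameter
theorem pv_pat_no_inner (pk : String) (hpk : '{' ∉ pk.toList) (p : String) (r : List Char)
    (h0 : (pvPat p).isPrefixOf (pvPat pk ++ r) = false) :
    ∀ j, j < (pvPat pk).length → (pvPat p).isPrefixOf (List.drop j (pvPat pk ++ r)) = false := by
  intro j hj
  match j with
  | 0 => simpa using h0
  | 1 =>
      rw [show pvPat pk ++ r = '{' :: '{' :: ' ' :: ((pk.toList ++ [' ', '}', '}']) ++ r) from by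
        simp [pvPat]]
      simp [pvPat, List.isPrefixOf]
  | (j + 2) =>
      have hlt : j + 2 < (pvPat pk).length := hj
      have hjlt : j < (' ' :: (pk.toList ++ [' ', '}', '}'])).length := by
        simp only [pvPat, List.length_cons, List.length_append] at hlt ⊢
        omega
      have hdropeq : List.drop (j + 2) (pvPat pk ++ r)
          = List.drop j ((' ' :: (pk.toList ++ [' ', '}', '}'])) ++ r) := by
        rfl
      have hhead : (List.drop j ((' ' :: (pk.toList ++ [' ', '}', '}'])) ++ r)).head?
          = some ((' ' :: (pk.toList ++ [' ', '}', '}']))[j]'hjlt) := by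
        rw [List.head?_drop, List.getElem?_append_left hjlt, List.getElem?_eq_getElem hjlt]
      have hne : (' ' :: (pk.toList ++ [' ', '}', '}']))[j]'hjlt ≠ '{' := by
        intro hc
        have hmem := List.getElem_mem hjlt
        rw [hc] at hmem
        simp only [List.mem_cons, List.mem_append] at hmem
        rcases hmem with h | h | h
        · exact absurd h (by decide)
        · exact hpk h
        · simp at h
      rw [hdropeq]
      cases hdrop : List.drop j ((' ' :: (pk.toList ++ [' ', '}', '}'])) ++ r) with
      | nil => rw [hdrop] at hhead; simp at hhead
      | cons b z =>
          rw [hdrop] at hhead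
          simp only [List.head?_cons, Option.some.injEq] at hhead
          rw [Bool.eq_false_iff]
          intro hcontra
          obtain ⟨z', hz⟩ := pv_prefix_head ('{' :: ' ' :: (p.toList ++ [' ', '}', '}'])) (b :: z) (by
            exact hcontra)
          have hb : b = '{' := (List.cons.injEq _ _ _ _).mp hz |>.1
          rw [hhead] at hb
          exact hne hb

theorem pv_F_nil : ∀ ps : List String,
    ps.foldl (fun replaced p => PySem.Chars.replace replaced (pvPat p) "ignored".toList) [] = [] := by
  intro ps
  induction ps with
  | nil => rfl
  | cons p ps ih =>
      simp only [List.foldl_cons, pv_replace_nil (pvPat p) _ (pv_pat_ne_nil p)]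
      exact ih

theorem pv_skip_ign : ∀ (ps : List String) (y : List Char),
    ps.foldl (fun replaced p => PySem.Chars.replace replaced (pvPat p) "ignored".toList)
        ("ignored".toList ++ y)
      = "ignored".toList ++
        ps.foldl (fun replaced p => PySem.Chars.replace replaced (pvPat p) "ignored".toList) y := by
  intro ps
  induction ps with
  | nil => intro y; rfl
  | cons p ps ih =>
      intro y
      simp only [List.foldl_cons]
      rw [pv_skip (pvPat p) "ignored".toList (pv_pat_ne_nil p) "ignored".toList y
        (pv_no_match_in_ign p y)]
      exact ih _

theorem pv_block (pk : String) (hpk : '{' ∉ pk.toList) (l₂ : List String) :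
    ∀ (l₁ : List String) (r : List Char),
      (∀ p ∈ l₁, (pvPat p).isPrefixOf (pvPat pk ++ r) = false ∧ ¬ ("ignored".toList <:+: pvPat p)) →
      (l₁ ++ pk :: l₂).foldl
          (fun replaced p => PySem.Chars.replace replaced (pvPat p) "ignored".toList)
          (pvPat pk ++ r)
        = "ignored".toList ++
          (l₁ ++ pk :: l₂).foldl
            (fun replaced p => PySem.Chars.replace replaced (pvPat p) "ignored".toList) r := by
  intro l₁
  induction l₁ with
  | nil =>
      intro r _
      simp only [List.nil_append, List.foldl_cons]
      rw [pv_replace_head (pvPat pk) "ignored".toList r (pv_pat_ne_nil pk)]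
      rw [pv_skip_ign l₂ _]
  | cons p l₁ ih =>
      intro r h
      have hp := h p (by simp)
      have hstep : PySem.Chars.replace (pvPat pk ++ r) (pvPat p) "ignored".toList
          = pvPat pk ++ PySem.Chars.replace r (pvPat p) "ignored".toList := by
        exact pv_skip (pvPat p) "ignored".toList (pv_pat_ne_nil p) (pvPat pk) r
          (pv_pat_no_inner pk hpk p r hp.1)
      simp only [List.cons_append, List.foldl_cons]
      rw [hstep]
      rw [ih (PySem.Chars.replace r (pvPat p) "ignored".toList) (fun p' hp' => by
        obtain ⟨hpre, hinf⟩ := h p' (by simp [hp'])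
        refine ⟨?_, hinf⟩
        rw [Bool.eq_false_iff]
        intro hcontra
        have hpref : pvPat p' <+: PySem.Chars.replace (pvPat pk ++ r) (pvPat p) "ignored".toList := by
          rw [hstep]
          exact List.isPrefixOf_iff_prefix.mp hcontra
        have := pv_pullback (pvPat p) "ignored".toList (pvPat p') (pv_pat_ne_nil p)
          (by decide) hinf (pv_pat_getLast p') (pvPat pk ++ r) (pvPat p')
          (List.suffix_refl _) hpref
        rw [← List.isPrefixOf_iff_prefix] at this
        rw [hpre] at this
        simp at this)]

theorem pv_no_match_step : ∀ (ps : List String) (c : Char) (t : List Char),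
    (∀ p ∈ ps, (pvPat p).isPrefixOf (c :: t) = false ∧ ¬ ("ignored".toList <:+: pvPat p)) →
    ps.foldl (fun replaced p => PySem.Chars.replace replaced (pvPat p) "ignored".toList) (c :: t)
      = c :: ps.foldl (fun replaced p => PySem.Chars.replace replaced (pvPat p) "ignored".toList) t := by
  intro ps
  induction ps with
  | nil => intro c t _; rfl
  | cons p ps ih =>
      intro c t h
      have hp := h p (by simp)
      simp only [List.foldl_cons]
      rw [pv_replace_cons (pvPat p) "ignored".toList c t (pv_pat_ne_nil p) hp.1]
      rw [ih c (PySem.Chars.replace t (pvPat p) "ignored".toList) (fun p' hp' => by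
        obtain ⟨hpre, hinf⟩ := h p' (by simp [hp'])
        refine ⟨?_, hinf⟩
        rw [Bool.eq_false_iff]
        intro hcontra
        have hpref : pvPat p' <+: PySem.Chars.replace (c :: t) (pvPat p) "ignored".toList := by
          rw [pv_replace_cons (pvPat p) "ignored".toList c t (pv_pat_ne_nil p) hp.1]
          exact List.isPrefixOf_iff_prefix.mp hcontra
        have := pv_pullback (pvPat p) "ignored".toList (pvPat p') (pv_pat_ne_nil p)
          (by decide) hinf (pv_pat_getLast p') (c :: t) (pvPat p')
          (List.suffix_refl _) hpref
        rw [← List.isPrefixOf_iff_prefix] at this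
        rw [hpre] at this
        simp at this)]

theorem pvScan_succ_cons (pats : List (List Char)) (fuel : Nat) (t : List Char) :
    pvScan pats (fuel + 1) ('{' :: t)
      = match pats.find? (fun q => q.isPrefixOf ('{' :: t)) with
        | some q => "ignored".toList ++ pvScan pats fuel (List.drop q.length ('{' :: t))
        | none => '{' :: pvScan pats fuel t := by
  simp [pvScan]

theorem pvScan_succ_cons_ne (pats : List (List Char)) (fuel : Nat) (c : Char) (t : List Char)
    (hc : ¬ c = '{') :
    pvScan pats (fuel + 1) (c :: t) = c :: pvScan pats fuel t := by
  simp [pvScan, hc]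

theorem pv_main (ps : List String) :
    ∀ (fuel : Nat) (s : List Char), s.length ≤ fuel →
      (∀ p ∈ ps, ¬ ("ignored".toList <:+: p.toList) ∧
        ('{' ∉ p.toList ∨ ¬ (pvPat p <:+: s))) →
      ps.foldl (fun replaced p => PySem.Chars.replace replaced (pvPat p) "ignored".toList) s
        = pvScan (ps.map pvPat) fuel s := by
  intro fuel
  induction fuel with
  | zero =>
      intro s h _
      have : s = [] := by cases s <;> simp_all
      subst this
      rw [pv_F_nil]
      rfl
  | succ fuel ih =>
      intro s h hps
      cases s with
      | nil => rw [pv_F_nil]; rfl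
      | cons c t =>
          by_cases hc : c = '{'
          · subst hc
            cases hf : (ps.map pvPat).find? (fun q => q.isPrefixOf ('{' :: t)) with
            | none =>
                have hall := List.find?_eq_none.mp hf
                have h1 : ∀ p ∈ ps, (pvPat p).isPrefixOf ('{' :: t) = false ∧
                    ¬ ("ignored".toList <:+: pvPat p) := fun p hp =>
                  ⟨by
                    have hx := hall (pvPat p) (List.mem_map_of_mem hp)
                    exact Bool.eq_false_iff.mpr hx,
                   fun hi => (hps p hp).1 (pv_ign_infix p hi)⟩
                rw [pv_no_match_step ps '{' t h1]
                rw [ih t (by simpa using Nat.le_of_succ_le_succ h) (fun p hp =>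
                  ⟨(hps p hp).1,
                   (hps p hp).2.imp id (fun habs hinf =>
                     habs (hinf.trans (List.suffix_cons '{' t).isInfix))⟩)]
                rw [pvScan_succ_cons, hf]
            | some q =>
                obtain ⟨hq, as, bs, hmap, hfirst⟩ := List.find?_eq_some_iff_append.mp hf
                obtain ⟨l₁, l₂', hps_eq, hmap1, hmap2⟩ := List.map_eq_append_iff.mp hmap
                obtain ⟨pk, l₂, hl₂', hqk, hmap3⟩ := List.map_eq_cons_iff.mp hmap2
                subst hl₂'
                obtain ⟨r, hr⟩ := List.isPrefixOf_iff_prefix.mp hq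
                -- hr : q ++ r = '{' :: t
                have hqinf : pvPat pk <:+: ('{' :: t) := by
                  rw [hqk]
                  exact (List.isPrefixOf_iff_prefix.mp hq).isInfix
                have hpk : '{' ∉ pk.toList := by
                  rcases (hps pk (by rw [hps_eq]; simp)).2 with hpk | habs
                  · exact hpk
                  · exact absurd hqinf habs
                have hblock := pv_block pk hpk l₂ l₁ r (fun p hp => by
                  constructor
                  · have hmem : pvPat p ∈ as := by
                      rw [← hmap1]; exact List.mem_map_of_mem hp
                    have := hfirst (pvPat p) hmem
                    rw [hqk, hr]
                    simpa using this
                  · intro hi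
                    exact (hps p (by rw [hps_eq]; simp [hp])).1 (pv_ign_infix p hi))
                rw [← hqk] at hr
                have hrsuf : r <:+ ('{' :: t) := ⟨pvPat pk, hr⟩
                have hgoal1 : ps.foldl
                    (fun replaced p => PySem.Chars.replace replaced (pvPat p) "ignored".toList)
                    ('{' :: t) = "ignored".toList ++ ps.foldl
                    (fun replaced p => PySem.Chars.replace replaced (pvPat p) "ignored".toList) r := by
                  rw [hps_eq, ← hr]
                  exact hblock
                rw [hgoal1]
                have hlenr : r.length ≤ fuel := by
                  have h2 := congrArg List.length hr
                  simp only [pvPat, List.length_append, List.length_cons] at h2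
                  have h3 := h
                  simp only [List.length_cons] at h3
                  omega
                rw [ih r hlenr (fun p hp =>
                  ⟨(hps p hp).1,
                   (hps p hp).2.imp id (fun habs hinf =>
                     habs (hinf.trans hrsuf.isInfix))⟩)]
                have hdrop : List.drop q.length ('{' :: t) = r := by
                  rw [← hr, hqk, List.drop_left]
                have hsc : pvScan (ps.map pvPat) (fuel + 1) ('{' :: t)
                    = "ignored".toList ++ pvScan (ps.map pvPat) fuel (List.drop q.length ('{' :: t)) := by
                  rw [pvScan_succ_cons, hf]
                rw [hsc, hdrop]
          · have h1 : ∀ p ∈ ps, (pvPat p).isPrefixOf (c :: t) = false ∧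
                ¬ ("ignored".toList <:+: pvPat p) := fun p hp =>
              ⟨by
                rw [Bool.eq_false_iff]
                intro hx
                obtain ⟨z', hz⟩ := pv_prefix_head ('{' :: ' ' :: (p.toList ++ [' ', '}', '}']))
                  (c :: t) hx
                exact hc ((List.cons.injEq _ _ _ _).mp hz).1,
               fun hi => (hps p hp).1 (pv_ign_infix p hi)⟩
            rw [pv_no_match_step ps c t h1]
            rw [ih t (by simpa using Nat.le_of_succ_le_succ h) (fun p hp =>
              ⟨(hps p hp).1,
               (hps p hp).2.imp id (fun habs hinf =>
                 habs (hinf.trans (List.suffix_cons c t).isInfix))⟩)]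
            rw [pvScan_succ_cons_ne (ps.map pvPat) fuel c t hc]

-- ===== VERDICT (by name: the statement is the Claim_ definition above) =====
theorem ignore_params_from_template_str_spec : Claim_equal_ignore_params_from_template_str := by
  intro template_str ignore_params _ hpre
  unfold Spec_ignore_params_from_template_str
  unfold ignore_params_from_template_str ignore_params_from_template_str_alt
  by_cases hemp : ignore_params.isEmpty
  · have h0 : ignore_params = [] := List.isEmpty_iff.mp hemp
    subst h0
    simp [String.ofList_toList]
  · have hemp' : ignore_params.isEmpty = false := Bool.eq_false_iff.mpr hemp
    simp only [hemp', Bool.false_eq_true, if_false]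
    exact congrArg String.ofList
      (pv_main ignore_params template_str.toList.length template_str.toList (le_refl _) hpre)
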